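-- pv_equiv track=rewrite | github.com/MogioR/reviews_cheker | review_analysis.py | check_end_of_sentence
-- ===== SOURCE A (Python) =====
-- def check_end_of_sentence(sentence):
--     if len(sentence) == 0:
--         return False
--
--     end_symbol = ''
--     skip_phase = True
--     count_end_symbols = 0
--
--     for i in range(len(sentence)):
--         if skip_phase:
--             if sentence[-i - 1] == ' ':
--                 continue
--             elif sentence[-i - 1] == '.' or sentence[-i - 1] == '!':
--                 skip_phase = False
--                 end_symbol = sentence[-i - 1]
--             else:
--                 return False
--         else:
--             if sentence[-i - 1] == end_symbol:
--                 if count_end_symbols < 3: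
--                     count_end_symbols += 1
--                 else:
--                     return False
--             else:
--                 if sentence[-i - 1] != '.' and sentence[-i - 1] != '!':
--                     return True
--                 else:
--                     return False
--     return False
-- ===== SOURCE B (Python) =====
-- def check_end_of_sentence(sentence):
--     s = sentence.rstrip(' ')
--     if not s or s[-1] not in '.!':
--         return False
--     c = s[-1]
--     k = len(s) - len(s.rstrip(c))
--     if k > 4 or k == len(s):
--         return False
--     return s[-k - 1] not in '.!'
-- ===== Notes on version B (the rewrite author's own statement) =====
-- stated objective: simpler
-- what changed: Replaces A's backward character-by-character state machine (skip phase / count phase with early returns) by rstrip(' ') plus a trailing-run-length computation and a single index check of the preceding character.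
import Mathlib
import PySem

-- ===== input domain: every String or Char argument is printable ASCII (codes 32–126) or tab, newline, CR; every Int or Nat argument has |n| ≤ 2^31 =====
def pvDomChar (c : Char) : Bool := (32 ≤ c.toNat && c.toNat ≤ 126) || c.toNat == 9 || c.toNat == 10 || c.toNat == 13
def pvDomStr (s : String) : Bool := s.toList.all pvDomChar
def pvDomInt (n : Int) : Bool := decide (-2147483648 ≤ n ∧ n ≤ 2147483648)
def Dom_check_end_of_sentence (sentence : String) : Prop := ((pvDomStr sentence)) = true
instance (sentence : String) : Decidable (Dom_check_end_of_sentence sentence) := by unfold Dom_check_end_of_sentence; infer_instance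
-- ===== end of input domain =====

-- B replaces A's backward state-machine scan by rstrip + a trailing-run length + one index check (objective: simpler).

-- ===== PORT A =====
-- A reads sentence[-i-1] for i = 0,1,…: a left-to-right walk over the reversed character list.
-- Python's end_symbol starts as the empty string (never compared while skip_phase); the port uses a space character as the placeholder.
def pvALoop (rev : List Char) (endSym : Char) (skipPhase : Bool) (cnt : Nat) : Bool :=
  match rev with
  | [] => false          -- loop ends without returning → return False
  | c :: rest =>
    if skipPhase then
      if c = ' ' then pvALoop rest endSym skipPhase cnt
      else if c = '.' ∨ c = '!' then pvALoop rest c false cnt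
      else false
    else
      if c = endSym then
        (if cnt < 3 then pvALoop rest endSym skipPhase (cnt + 1) else false)
      else
        (if c ≠ '.' ∧ c ≠ '!' then true else false)

def check_end_of_sentence (sentence : String) : Bool :=
  if sentence.toList.length = 0 then false
  else pvALoop sentence.toList.reverse ' ' true 0

-- ===== PORT B =====
-- Source B's s.rstrip(' ') / s.rstrip(c) are ported exactly as dropping that character from
-- the right end, done on the reversed list (dropWhile); k is the trailing-run length.
def check_end_of_sentence_alt (sentence : String) : Bool :=
  match sentence.toList.reverse.dropWhile (· == ' ') with -- s = sentence.rstrip(' '), reversed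
  | [] => false                                           -- not s
  | c :: rest =>
    if ¬ (c = '.' ∨ c = '!') then false                   -- s[-1] not in '.!'
    else
      -- k := 1 + (rest.takeWhile (· == c)).length  is  len(s) - len(s.rstrip(c))
      if 1 + (rest.takeWhile (· == c)).length > 4
         ∨ 1 + (rest.takeWhile (· == c)).length = (c :: rest).length then false
      else
        match (c :: rest)[1 + (rest.takeWhile (· == c)).length]? with  -- s[-k-1]
        | some d => decide (¬ (d = '.' ∨ d = '!'))
        | none => false                                   -- unreachable: k < len(s)

-- ===== PRECONDITION & SPEC =====
def Spec_check_end_of_sentence (sentence : String) (out : Bool) : Prop := out = check_end_of_sentence_alt sentence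
instance (sentence : String) (out : Bool) : Decidable (Spec_check_end_of_sentence sentence out) := by unfold Spec_check_end_of_sentence; infer_instance

-- ===== CLAIM (what is proved, stated in full; the proofs are below) =====
def Claim_equal_check_end_of_sentence : Prop := ∀ (sentence : String), Dom_check_end_of_sentence sentence → Spec_check_end_of_sentence sentence (check_end_of_sentence sentence)

-- ===== LEMMAS AND PROOFS =====

-- Counting phase of A, characterised by the run of endSym at the head of rest.
theorem pvALoop_count (c : Char) :
    ∀ (rest : List Char) (cnt : Nat), cnt ≤ 3 →
    pvALoop rest c false cnt =
      (if 4 - cnt ≤ (rest.takeWhile (· == c)).length then false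
       else match rest[(rest.takeWhile (· == c)).length]? with
            | some d => decide (¬ (d = '.' ∨ d = '!'))
            | none => false) := by
  intro rest
  induction rest with
  | nil =>
    intro cnt hcnt
    simp only [pvALoop, List.takeWhile_nil, List.length_nil]
    rw [if_neg (by omega : ¬ (4 - cnt ≤ 0))]
    rfl
  | cons d rs ih =>
    intro cnt hcnt
    by_cases hd : d = c
    · subst hd
      have htw : (d :: rs).takeWhile (· == d) = d :: rs.takeWhile (· == d) := by
        simp
      rw [htw]
      simp only [List.length_cons]
      have hA : pvALoop (d :: rs) d false cnt
          = if cnt < 3 then pvALoop rs d false (cnt + 1) else false := by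
        simp [pvALoop]
      rw [hA]
      by_cases h3 : cnt < 3
      · rw [if_pos h3, ih (cnt + 1) (by omega)]
        have hcond : (4 - (cnt + 1) ≤ (rs.takeWhile (· == d)).length)
            ↔ (4 - cnt ≤ (rs.takeWhile (· == d)).length + 1) := by omega
        have hidx : (d :: rs)[(rs.takeWhile (· == d)).length + 1]?
            = rs[(rs.takeWhile (· == d)).length]? := by simp
        by_cases hj : 4 - (cnt + 1) ≤ (rs.takeWhile (· == d)).length
        · rw [if_pos hj, if_pos (hcond.mp hj)]
        · rw [if_neg hj, if_neg (fun h => hj (hcond.mpr h)), hidx]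
      · rw [if_neg h3, if_pos (by omega)]
    · have hbeq : (d == c) = false := by simp [hd]
      have htw : (d :: rs).takeWhile (· == c) = [] := by
        simp [hbeq]
      rw [htw]
      simp only [List.length_nil]
      rw [if_neg (by omega : ¬ (4 - cnt ≤ 0))]
      simp only [List.getElem?_cons_zero]
      simp only [pvALoop, if_neg hd]
      by_cases h : d ≠ '.' ∧ d ≠ '!'
      · rw [if_pos h]; simp; tauto
      · rw [if_neg h]; simp; tauto

-- Skip phase of A = dropWhile spaces, then the two heads agree.
theorem pvALoop_eq_alt_core : ∀ (rev : List Char),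
    pvALoop rev ' ' true 0 =
      (match rev.dropWhile (· == ' ') with
       | [] => false
       | c :: rest =>
         if ¬ (c = '.' ∨ c = '!') then false
         else
           if 1 + (rest.takeWhile (· == c)).length > 4
              ∨ 1 + (rest.takeWhile (· == c)).length = (c :: rest).length then false
           else match (c :: rest)[1 + (rest.takeWhile (· == c)).length]? with
                | some d => decide (¬ (d = '.' ∨ d = '!'))
                | none => false) := by
  intro rev
  induction rev with
  | nil => simp [pvALoop]
  | cons c rest ih =>
    by_cases hsp : c = ' '
    · subst hsp
      simpa [pvALoop, List.dropWhile_cons] using ih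
    · have hbeq : (c == ' ') = false := by simp [hsp]
      simp only [List.dropWhile_cons, hbeq, if_neg, Bool.false_eq_true, not_false_iff]
      by_cases hc : c = '.' ∨ c = '!'
      · have hA : pvALoop (c :: rest) ' ' true 0 = pvALoop rest c false 0 := by
          simp [pvALoop, hsp, hc]
        rw [hA, pvALoop_count c rest 0 (by omega)]
        simp only [if_neg (by simp [hc] : ¬ ¬ (c = '.' ∨ c = '!'))]
        set j := (rest.takeWhile (· == c)).length with hj
        have hjle : j ≤ rest.length := by
          simpa [hj] using (List.takeWhile_sublist (p := (· == c)) (l := rest)).length_le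
        have hidx : (c :: rest)[1 + j]? = rest[j]? := by
          have h1 : 1 + j = j + 1 := by omega
          rw [h1]; simp
        by_cases h4 : 4 ≤ j
        · rw [if_pos (by omega : 4 - 0 ≤ j), if_pos (by left; omega)]
        · rw [if_neg (by omega : ¬ (4 - 0 ≤ j))]
          by_cases hend : 1 + j = (c :: rest).length
          · rw [if_pos (by right; exact hend)]
            have hjr : j = rest.length := by simp at hend; omega
            rw [hjr, List.getElem?_eq_none (Nat.le_refl _)]
          · rw [if_neg (by push Not; exact ⟨by omega, hend⟩), hidx]
      · simp [pvALoop, hsp, hc]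

-- ===== VERDICT (by name: the statement is the Claim_ definition above) =====
theorem check_end_of_sentence_spec : Claim_equal_check_end_of_sentence := by
  intro sentence _
  unfold Spec_check_end_of_sentence check_end_of_sentence check_end_of_sentence_alt
  by_cases h0 : sentence.toList.length = 0
  · have : sentence.toList = [] := List.length_eq_zero_iff.mp h0
    simp [this]
  · rw [if_neg h0, pvALoop_eq_alt_core]
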